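-- pv_equiv track=rewrite | github.com/26XINXIN/leedcode | 205_isomorphic_string.py | get_pattern
-- ===== SOURCE A (Python) =====
-- def get_pattern(s):
--     pattern = ""
--     mapping = dict()
--     for i in range(len(s)):
--         if s[i] in mapping:
--             pattern += mapping[s[i]]
--         else:
--             mapping[s[i]] = str(chr(ord("A") + len(mapping)))
--             pattern += mapping[s[i]]
--     return pattern
-- ===== SOURCE B (Python) =====
-- def get_pattern(s):
--     # label of a character = number of distinct characters strictly before its
--     # first occurrence; computed per position from the string itself, stateless.
--     return "".join(chr(ord("A") + len(set(s[:s.index(c)]))) for c in s)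
-- ===== Notes on version B (the rewrite author's own statement) =====
-- stated objective: alternative
-- what changed: Replaces A's single stateful pass that grows a char->label dict while emitting with a stateless per-position formula: each character's label offset is the number of distinct characters in the prefix before that character's first occurrence (str.index plus a set of a slice), so no mapping is ever built or carried.
import Mathlib
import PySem

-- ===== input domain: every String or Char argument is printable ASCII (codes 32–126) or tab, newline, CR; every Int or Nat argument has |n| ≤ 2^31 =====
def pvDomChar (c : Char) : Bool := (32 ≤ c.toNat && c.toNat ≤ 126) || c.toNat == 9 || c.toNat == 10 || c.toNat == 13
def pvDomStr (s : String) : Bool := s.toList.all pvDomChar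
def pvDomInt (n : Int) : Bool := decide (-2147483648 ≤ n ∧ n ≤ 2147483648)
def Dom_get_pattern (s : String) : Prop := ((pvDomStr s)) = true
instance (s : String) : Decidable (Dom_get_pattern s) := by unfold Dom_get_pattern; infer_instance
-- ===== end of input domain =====

-- B replaces A's single stateful pass (growing a char→label dict while emitting) by a
-- stateless per-position formula: label(c) = 'A' + |set(s[:s.index(c)])| (objective: alternative).

-- ===== PORT A =====
-- A's loop: for each character, emit its mapped label, inserting a fresh
-- label chr(ord('A')+len(mapping)) on first sight.  (each mapping value is a
-- one-character string in Python; it is carried as that Char here)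
def getPatternLoopA (cs : List Char) (mapping : PySem.Dict Char Char) (pattern : List Char) : List Char :=
  match cs with
  | [] => pattern
  | c :: rest =>
    match mapping.get? c with
    | some v => getPatternLoopA rest mapping (pattern ++ [v])
    | none =>
      let v := Char.ofNat ('A'.toNat + mapping.size)
      getPatternLoopA rest (mapping.insert c v) (pattern ++ [v])

def get_pattern (s : String) : String :=
  String.ofList (getPatternLoopA s.toList PySem.Dict.empty [])

-- ===== PORT B =====
-- ''.join(chr(ord('A') + len(set(s[:s.index(c)]))) for c in s)
-- s.index(c) never raises here (c is drawn from s); the .getD 0 only unwraps that some.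
def get_pattern_alt (s : String) : String :=
  String.ofList (s.toList.map (fun c =>
    Char.ofNat ('A'.toNat +
      (PySem.Set.ofList
        (PySem.List.slice s.toList none
          (some (((PySem.List.index? s.toList c).getD 0 : Nat) : Int)))).length)))

-- ===== PRECONDITION & SPEC =====
def Spec_get_pattern (s : String) (out : String) : Prop := out = get_pattern_alt s
instance (s : String) (out : String) : Decidable (Spec_get_pattern s out) := by unfold Spec_get_pattern; infer_instance

-- ===== CLAIM (what is proved, stated in full; the proofs are below) =====
def Claim_equal_get_pattern : Prop := ∀ (s : String), Dom_get_pattern s → Spec_get_pattern s (get_pattern s)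

-- ===== LEMMAS AND PROOFS =====

-- the distinct-characters accumulator both programs are secretly computing
def distAcc (d : List Char) (cs : List Char) : List Char :=
  cs.foldl PySem.Set.add d

lemma distAcc_cons (d : List Char) (c : Char) (cs : List Char) :
    distAcc d (c :: cs) = distAcc (PySem.Set.add d c) cs := rfl

lemma distAcc_append (d : List Char) (a b : List Char) :
    distAcc d (a ++ b) = distAcc (distAcc d a) b := by
  simp [distAcc, List.foldl_append]

lemma distAcc_eq_ofList (cs : List Char) : distAcc [] cs = PySem.Set.ofList cs := by
  rw [PySem.Set.ofList_eq_foldl]; rfl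

lemma set_add_of_mem (d : List Char) (c : Char) (h : c ∈ d) : PySem.Set.add d c = d := by
  simp [PySem.Set.add, PySem.Set.contains, h]

lemma set_add_of_not_mem (d : List Char) (c : Char) (h : c ∉ d) :
    PySem.Set.add d c = d ++ [c] := by
  simp [PySem.Set.add, PySem.Set.contains, h]

lemma distAcc_prefix (cs d : List Char) : ∃ t, distAcc d cs = d ++ t := by
  induction cs generalizing d with
  | nil => exact ⟨[], by simp [distAcc]⟩
  | cons c rest ih =>
    rw [distAcc_cons]
    by_cases h : c ∈ d
    · rw [set_add_of_mem d c h]; exact ih d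
    · rw [set_add_of_not_mem d c h]
      obtain ⟨t, ht⟩ := ih (d ++ [c])
      exact ⟨c :: t, by simpa using ht⟩

lemma idxOf_distAcc_of_mem (cs d : List Char) (c : Char) (h : c ∈ d) :
    List.idxOf c (distAcc d cs) = List.idxOf c d := by
  obtain ⟨t, ht⟩ := distAcc_prefix cs d
  rw [ht, List.idxOf_append, if_pos h]

-- main invariant of A's loop: the mapping is exactly "index in the distinct list so far"
lemma loopA_eq (cs : List Char) :
    ∀ (d p : List Char) (m : PySem.Dict Char Char),
      (∀ c, m.get? c = if c ∈ d then some (Char.ofNat ('A'.toNat + List.idxOf c d)) else none) →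
      m.size = d.length →
      getPatternLoopA cs m p
        = p ++ cs.map (fun c => Char.ofNat ('A'.toNat + List.idxOf c (distAcc d cs))) := by
  induction cs with
  | nil => intro d p m _ _; simp [getPatternLoopA]
  | cons c rest ih =>
    intro d p m hget hsize
    by_cases h : c ∈ d
    · have hsome : m.get? c = some (Char.ofNat ('A'.toNat + List.idxOf c d)) := by
        rw [hget, if_pos h]
      have hidx : List.idxOf c (distAcc d rest) = List.idxOf c d :=
        idxOf_distAcc_of_mem rest d c h
      simp only [getPatternLoopA, hsome]
      rw [ih d _ m hget hsize, distAcc_cons, set_add_of_mem d c h]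
      simp [hidx]
    · have hnone : m.get? c = none := by rw [hget, if_neg h]
      have hcont : m.contains c = false := (PySem.Dict.get?_eq_none_iff_contains m c).mp hnone
      have hidxc : List.idxOf c (d ++ [c]) = d.length := by
        rw [List.idxOf_append, if_neg h]; simp
      have hget' : ∀ c', (m.insert c (Char.ofNat ('A'.toNat + m.size))).get? c'
          = if c' ∈ d ++ [c] then some (Char.ofNat ('A'.toNat + List.idxOf c' (d ++ [c]))) else none := by
        intro c'
        rw [PySem.Dict.get?_insert]
        by_cases hc' : c' = c
        · subst hc'; simp [hidxc, hsize]
        · rw [if_neg hc', hget c']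
          have hmem : c' ∈ d ++ [c] ↔ c' ∈ d := by simp [hc']
          by_cases hm : c' ∈ d
          · rw [if_pos hm, if_pos (hmem.mpr hm)]
            rw [List.idxOf_append, if_pos hm]
          · rw [if_neg hm, if_neg (fun hx => hm (hmem.mp hx))]
      have hsize' : (m.insert c (Char.ofNat ('A'.toNat + m.size))).size = (d ++ [c]).length := by
        rw [PySem.Dict.size_insert, if_neg (by simp [hcont]), hsize]; simp
      have hidx : List.idxOf c (distAcc (d ++ [c]) rest) = d.length := by
        rw [idxOf_distAcc_of_mem rest (d ++ [c]) c (by simp), hidxc]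
      simp only [getPatternLoopA, hnone]
      rw [ih (d ++ [c]) _ _ hget' hsize', distAcc_cons, set_add_of_not_mem d c h]
      simp [hidx, hsize]

-- B's per-character formula computes the same index: for c ∈ cs,
-- idxOf c (ordered distinct list of cs) = |set of the prefix before c's first occurrence|
lemma label_eq (cs : List Char) (c : Char) (k : Nat)
    (hk : PySem.List.index? cs c = some k) :
    List.idxOf c (distAcc [] cs)
      = (PySem.Set.ofList (List.take k cs)).length := by
  obtain ⟨u, v, hsplit, hlen, hnot⟩ := (PySem.List.index?_eq_some_iff cs c k).mp hk
  subst hsplit hlen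
  have htake : List.take u.length (u ++ c :: v) = u := by simp
  rw [htake]
  have hnmem : c ∉ distAcc [] u := by
    rw [distAcc_eq_ofList, ← PySem.List.dedup_eq_ofList]
    simpa [PySem.List.mem_dedup] using hnot
  rw [distAcc_append, distAcc_cons, set_add_of_not_mem _ _ hnmem,
      idxOf_distAcc_of_mem _ _ _ (by simp), List.idxOf_append, if_neg hnmem,
      distAcc_eq_ofList]
  simp

-- ===== VERDICT (by name: the statement is the Claim_ definition above) =====
theorem get_pattern_spec : Claim_equal_get_pattern := by
  intro s _
  unfold Spec_get_pattern get_pattern get_pattern_alt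
  rw [loopA_eq s.toList [] [] PySem.Dict.empty
        (by intro c; simp [PySem.Dict.get?_empty]) (by simp [PySem.Dict.size_empty])]
  simp only [List.nil_append]
  congr 1
  apply List.map_congr_left
  intro c hc
  obtain ⟨k, hk⟩ := Option.isSome_iff_exists.mp
    ((PySem.List.index?_isSome_iff s.toList c).mpr hc)
  rw [hk]
  simp only [Option.getD_some]
  rw [PySem.List.slice_to_natCast, label_eq s.toList c k hk]
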